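-- pv_equiv track=rewrite | github.com/mdayoconnell/texasholdem-rl-lab | src/utils/hole_flop_classes.py | _encode_suits
-- ===== SOURCE A (Python) =====
-- from typing import Iterable, List, Optional, Sequence, Set, Tuple
--
-- def _encode_suits(suits_seq: Sequence[int]) -> Tuple[int, ...]:
--     mapping = {}
--     next_id = 0
--     encoded: List[int] = []
--     for s in suits_seq:
--         if s not in mapping:
--             mapping[s] = next_id
--             next_id += 1
--         encoded.append(mapping[s])
--     return tuple(encoded)
-- ===== SOURCE B (Python) =====
-- def _encode_suits(suits_seq):
--     # Dict-free: a suit's id equals the number of distinct suits that appear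
--     # strictly before its FIRST occurrence (first-appearance rank).
--     seq = list(suits_seq)
--     return tuple(len(set(seq[:seq.index(s)])) for s in seq)
-- ===== Notes on version B (the rewrite author's own statement) =====
-- stated objective: alternative
-- what changed: Dropped A's suit->id dict and counter entirely: B computes each label directly as the number of distinct values in the prefix before the element's first occurrence (len(set(seq[:seq.index(s)]))), per-element, with no mapping state carried across the loop.
import Mathlib
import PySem

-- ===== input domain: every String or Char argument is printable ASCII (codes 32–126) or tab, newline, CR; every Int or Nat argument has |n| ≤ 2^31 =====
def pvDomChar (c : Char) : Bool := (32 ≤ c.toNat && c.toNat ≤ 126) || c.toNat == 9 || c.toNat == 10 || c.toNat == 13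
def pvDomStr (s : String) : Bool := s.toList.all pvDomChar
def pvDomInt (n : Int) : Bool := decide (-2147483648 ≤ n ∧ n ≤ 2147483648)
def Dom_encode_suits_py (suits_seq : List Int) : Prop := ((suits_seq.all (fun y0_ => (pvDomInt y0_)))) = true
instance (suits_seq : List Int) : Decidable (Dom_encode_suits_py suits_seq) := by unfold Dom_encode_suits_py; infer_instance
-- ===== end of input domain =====

-- B drops A's suit->id dict and counter entirely: each label is computed per element as the
-- number of distinct values in the prefix before that element's first occurrence (objective: alternative).

-- ===== PORT A =====
-- loop body of A; `mapping[s]` after the branch is always present, so Python's KeyError is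
-- unreachable: ported exactly via getD with an unreachable default 0
def pyStepA (st : PySem.Dict Int Int × Int × List Int) (s : Int) :
    PySem.Dict Int Int × Int × List Int :=
  let st' := if st.1.contains s = false then (st.1.insert s st.2.1, st.2.1 + 1)
             else (st.1, st.2.1)
  (st'.1, st'.2, st.2.2 ++ [st'.1.getD s 0])

def encode_suits_py (suits_seq : List Int) : List Int :=
  (suits_seq.foldl pyStepA (PySem.Dict.empty, 0, [])).2.2

-- ===== PORT B =====
-- len(set(seq[:seq.index(s)])) for each s: `seq.index(s)` always succeeds (s is drawn from
-- seq), so Python's ValueError is unreachable: ported via getD with an unreachable default 0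
def encode_suits_py_alt (suits_seq : List Int) : List Int :=
  suits_seq.map (fun s =>
    PySem.Set.len (PySem.Set.ofList
        (PySem.List.slice suits_seq none
          (some (((PySem.List.index? suits_seq s).getD 0 : Nat) : Int)))))

-- ===== PRECONDITION & SPEC =====
def Spec_encode_suits_py (suits_seq : List Int) (out : List Int) : Prop := out = encode_suits_py_alt suits_seq
instance (suits_seq : List Int) (out : List Int) : Decidable (Spec_encode_suits_py suits_seq out) := by unfold Spec_encode_suits_py; infer_instance

-- ===== CLAIM (what is proved, stated in full; the proofs are below) =====
def Claim_equal_encode_suits_py : Prop := ∀ (suits_seq : List Int), Dom_encode_suits_py suits_seq → Spec_encode_suits_py suits_seq (encode_suits_py suits_seq)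

-- ===== LEMMAS AND PROOFS =====

/-- Proof-only view of the dedup step (equals `PySem.Set.add`). -/
def uniqStep (acc : List Int) (s : Int) : List Int := if s ∈ acc then acc else acc ++ [s]

theorem setAdd_eq_uniqStep : @PySem.Set.add Int _ = uniqStep := by
  funext s x
  rw [PySem.Set.add_eq_ite]
  rfl

/-- The dedup fold only appends to its accumulator. -/
theorem uniq_foldl_append (l : List Int) (acc : List Int) :
    ∃ t, l.foldl uniqStep acc = acc ++ t := by
  induction l generalizing acc with
  | nil => exact ⟨[], by simp⟩
  | cons s l ih =>
    simp only [List.foldl_cons, uniqStep]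
    by_cases h : s ∈ acc
    · simpa [h] using ih acc
    · obtain ⟨t, ht⟩ := ih (acc ++ [s])
      exact ⟨[s] ++ t, by simp [h, ht]⟩

/-- Positions of already-present elements are unchanged by the rest of the dedup fold. -/
theorem index?_uniq_foldl_of_mem (l : List Int) (acc : List Int) (s : Int) (h : s ∈ acc) :
    PySem.List.index? (l.foldl uniqStep acc) s = PySem.List.index? acc s := by
  obtain ⟨t, ht⟩ := uniq_foldl_append l acc
  rw [ht, PySem.List.index?_append_of_mem t h]

/-- Appending a different element does not change an element's first index. -/
theorem index?_append_singleton_of_ne (l : List Int) (s t : Int) (h : t ≠ s) :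
    PySem.List.index? (l ++ [s]) t = PySem.List.index? l t := by
  by_cases hm : t ∈ l
  · exact PySem.List.index?_append_of_mem [s] hm
  · rw [(PySem.List.index?_eq_none_iff _ _).mpr hm,
        (PySem.List.index?_eq_none_iff _ _).mpr (by simp [hm, h])]

/-- Main invariant for A: if the dict is exactly the index table of `un` and the counter is
`un.length`, A's remaining loop appends the indices into the final unique list. -/
theorem mainA (rest : List Int) : ∀ (un : List Int) (d : PySem.Dict Int Int) (enc : List Int),
    (∀ t, d.get? t = (PySem.List.index? un t).map (fun i => (i : Int))) →
    (rest.foldl pyStepA (d, (un.length : Int), enc)).2.2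
      = enc ++ rest.map (fun s =>
          match PySem.List.index? (rest.foldl uniqStep un) s with
          | some i => (i : Int)
          | none => 0) := by
  induction rest with
  | nil => intro un d enc _; simp
  | cons s rest ih =>
    intro un d enc hinv
    have hcont : d.contains s = decide (s ∈ un) := by
      rw [PySem.Dict.contains_eq_isSome_get?, hinv s]
      by_cases h : s ∈ un
      · obtain ⟨k, hk⟩ := Option.isSome_iff_exists.mp ((PySem.List.index?_isSome_iff _ _).mpr h)
        rw [hk]; simp [h]
      · rw [(PySem.List.index?_eq_none_iff _ _).mpr h]; simp [h]
    by_cases hmem : s ∈ un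
    · -- already seen: dict and counter unchanged
      obtain ⟨k, hk⟩ := Option.isSome_iff_exists.mp ((PySem.List.index?_isSome_iff _ _).mpr hmem)
      have hgd : d.getD s 0 = (k : Int) := by
        rw [PySem.Dict.getD_eq_get?_getD, hinv s, hk]; rfl
      have hstep : pyStepA (d, (un.length : Int), enc) s
          = (d, (un.length : Int), enc ++ [(k : Int)]) := by
        simp [pyStepA, hcont, hmem, hgd]
      have hidx : PySem.List.index? (rest.foldl uniqStep un) s = some k := by
        rw [index?_uniq_foldl_of_mem rest un s hmem, hk]
      have hu : (s :: rest).foldl uniqStep un = rest.foldl uniqStep un := by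
        simp only [List.foldl_cons, uniqStep, if_pos hmem]
      rw [List.foldl_cons, hstep, ih un d (enc ++ [(k : Int)]) hinv, hu, List.map_cons, hidx]
      simp
    · -- new suit: appended to the table at index un.length
      have hinv' : ∀ t, (d.insert s (un.length : Int)).get? t
          = (PySem.List.index? (un ++ [s]) t).map (fun i => (i : Int)) := by
        intro t
        rw [PySem.Dict.get?_insert]
        by_cases ht : t = s
        · rw [if_pos ht, ht, PySem.List.index?_append_singleton_self un s hmem]
          rfl
        · rw [if_neg ht, index?_append_singleton_of_ne un s t ht, hinv t]
      have hgd : (d.insert s (un.length : Int)).getD s 0 = (un.length : Int) := by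
        rw [PySem.Dict.getD_eq_get?_getD, PySem.Dict.get?_insert_self]; rfl
      have hstep : pyStepA (d, (un.length : Int), enc) s
          = (d.insert s (un.length : Int), (un.length : Int) + 1,
             enc ++ [(un.length : Int)]) := by
        simp [pyStepA, hcont, hmem, hgd]
      have hlen : ((un ++ [s]).length : Int) = (un.length : Int) + 1 := by
        simp
      have hidx : PySem.List.index? (rest.foldl uniqStep (un ++ [s])) s
          = some un.length := by
        rw [index?_uniq_foldl_of_mem rest (un ++ [s]) s (by simp),
            PySem.List.index?_append_singleton_self un s hmem]
      have hu : (s :: rest).foldl uniqStep un = rest.foldl uniqStep (un ++ [s]) := by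
        simp only [List.foldl_cons, uniqStep, if_neg hmem]
      rw [List.foldl_cons, hstep, ← hlen,
          ih (un ++ [s]) (d.insert s (un.length : Int)) (enc ++ [(un.length : Int)]) hinv', hu,
          List.map_cons, hidx]
      simp

/-- B's characterization: the first-appearance rank of `s` in `l` equals the number of
distinct values in the prefix before its first occurrence. -/
theorem prefix_rank (l : List Int) (s : Int) (f : Nat)
    (hf : PySem.List.index? l s = some f) :
    PySem.List.index? (l.foldl uniqStep []) s
      = some (PySem.Set.ofList (l.take f)).length := by
  obtain ⟨pre, suf, hl, hlen, hpre⟩ := (PySem.List.index?_eq_some_iff _ _ _).mp hf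
  have htake : l.take f = pre := by
    rw [hl, ← hlen, List.take_left]
  have hofl : PySem.List.dedup pre = pre.foldl uniqStep [] := by
    rw [PySem.List.dedup_eq_ofList, PySem.Set.ofList_eq_foldl, setAdd_eq_uniqStep]
  have hsmem : s ∉ pre.foldl uniqStep [] := by
    rw [← hofl]
    intro h
    exact hpre ((PySem.List.mem_dedup _ _).mp h)
  rw [htake, hl, List.foldl_append, List.foldl_cons]
  have hstep : uniqStep (pre.foldl uniqStep []) s = pre.foldl uniqStep [] ++ [s] := by
    simp only [uniqStep, if_neg hsmem]
  rw [hstep, index?_uniq_foldl_of_mem suf _ s (by simp),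
      PySem.List.index?_append_singleton_self _ s hsmem,
      PySem.Set.ofList_eq_foldl, setAdd_eq_uniqStep]

-- ===== VERDICT (by name: the statement is the Claim_ definition above) =====
theorem encode_suits_py_spec : Claim_equal_encode_suits_py := by
  intro l _
  unfold Spec_encode_suits_py encode_suits_py encode_suits_py_alt
  have hA : (l.foldl pyStepA (PySem.Dict.empty, 0, [])).2.2
      = l.map (fun s =>
          match PySem.List.index? (l.foldl uniqStep []) s with
          | some i => (i : Int)
          | none => 0) := by
    have h := mainA l [] PySem.Dict.empty []
      (by intro t; rw [PySem.Dict.get?_empty, (PySem.List.index?_eq_none_iff _ _).mpr (by simp)]; rfl)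
    simpa using h
  rw [hA]
  refine List.map_congr_left ?_
  intro s hs
  obtain ⟨f, hf⟩ := Option.isSome_iff_exists.mp ((PySem.List.index?_isSome_iff _ _).mpr hs)
  rw [prefix_rank l s f hf, hf]
  have hslice : PySem.List.slice l none (some ((f : Nat) : Int)) = l.take f :=
    PySem.List.slice_to_natCast l f
  simp [hslice, PySem.Set.len]
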